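-- pv_equiv track=rewrite | github.com/nunoandreLBAASB/Trabalho-AASB_LB | scripts/fetch_unreviewed_prots.py | is_reviewed
-- ===== SOURCE A (Python) =====
-- def is_reviewed(rdf):
--     boolean = {'true': True, 'false': False}
--     tag = 'reviewed'
--     s, e = '>', '<'
--     try:
--         start = rdf.index(tag)
--         start = start + rdf[start:].index(s) + 1
--         end = start + rdf[start:].index(e)
--         value = rdf[start:end].lower()
--         value = ''
--         for i in range(end - start):
--             value += rdf[start + i]
--         return boolean[value.lower()]
--     except ValueError:
--         return False
-- ===== SOURCE B (Python) =====
-- def is_reviewed(rdf):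
--     if 'reviewed' not in rdf:
--         return False
--     rest = rdf.split('reviewed', 1)[1]
--     if '>' not in rest:
--         return False
--     rest = rest.split('>', 1)[1]
--     if '<' not in rest:
--         return False
--     return rest.split('<', 1)[0].lower() == 'true'
-- ===== Notes on version B (the rewrite author's own statement) =====
-- stated objective: simpler
-- what changed: B replaces A's index arithmetic over the original string (three .index calls, manual slice bounds and a character-by-character copy loop inside a try/except) with successive one-split peeling: membership test then split(sep, 1)[1] for 'reviewed' and '>', then split('<', 1)[0].lower() compared to 'true'.
-- outside the precondition, e.g. on is_reviewed('reviewed>x<'): A raises KeyError, B returns False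
import Mathlib
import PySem

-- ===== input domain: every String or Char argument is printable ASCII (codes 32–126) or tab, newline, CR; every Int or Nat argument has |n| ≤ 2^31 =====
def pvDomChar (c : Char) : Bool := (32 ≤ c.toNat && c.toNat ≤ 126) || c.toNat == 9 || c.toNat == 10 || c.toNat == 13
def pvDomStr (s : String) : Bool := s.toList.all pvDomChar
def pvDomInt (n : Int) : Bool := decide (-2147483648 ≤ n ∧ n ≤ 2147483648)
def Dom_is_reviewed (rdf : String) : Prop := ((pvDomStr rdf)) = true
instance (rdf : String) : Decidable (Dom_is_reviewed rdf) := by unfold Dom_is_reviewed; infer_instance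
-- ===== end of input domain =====

-- B re-implements the parse by successive one-split peeling ('simpler'); on the inputs
-- Pre_ excludes A raises KeyError while B returns False (return values proved equal on Pre_).

-- ===== PORT A =====
-- literal transliteration of A: index arithmetic over the original string;
-- str.index raising ValueError is ported as PySem.Str.find returning -1 (the except branch).
-- one loop step of `value += rdf[start + i]` (the index is always in range there)
def pvPushGet (rdf : String) (idx : Int) (acc : String) : String :=
  match PySem.Str.pyGet? rdf idx with
  | some c => acc.push c
  | none => acc

def is_reviewed (rdf : String) : Bool :=
  let boolean : PySem.Dict String Bool :=
    (PySem.Dict.empty.insert "true" true).insert "false" false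
  let tag := "reviewed"
  let s := ">"
  let e := "<"
  let i0 := PySem.Str.find rdf tag
  if i0 = -1 then false else               -- rdf.index(tag) raised ValueError
  let start := i0
  let j := PySem.Str.find (PySem.Str.slice rdf (some start) none) s
  if j = -1 then false else                -- rdf[start:].index(s) raised ValueError
  let start := start + j + 1
  let k := PySem.Str.find (PySem.Str.slice rdf (some start) none) e
  if k = -1 then false else                -- rdf[start:].index(e) raised ValueError
  let stop := start + k
  let _value := PySem.Str.lower (PySem.Str.slice rdf (some start) (some stop))  -- dead: overwritten by ''
  let value := (PySem.List.pyRange 0 (stop - start) 1).foldl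
      (fun acc i => pvPushGet rdf (start + i) acc) ""       -- value += rdf[start + i]
  match boolean.get? (PySem.Str.lower value) with
  | some b => b
  | none => false                          -- boolean[...] raised KeyError: outside Pre_

-- ===== PORT B =====
-- transliteration of Source B: peel with split(sep, 1)[1]; the [1]/[0] indexings are guarded
-- by the membership tests, so List.getD's defaults are unreachable.
def is_reviewed_alt (rdf : String) : Bool :=
  if PySem.Str.isIn "reviewed" rdf = false then false else
  let rest := ((PySem.Str.splitMax? rdf "reviewed" 1).getD []).getD 1 ""
  if PySem.Str.isIn ">" rest = false then false else
  let rest := ((PySem.Str.splitMax? rest ">" 1).getD []).getD 1 ""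
  if PySem.Str.isIn "<" rest = false then false else
  ((PySem.Str.lower (((PySem.Str.splitMax? rest "<" 1).getD []).getD 0 "")) == "true")

-- ===== PRECONDITION & SPEC =====
-- pvParse? : the value A's parse extracts (lowercased), or none when any of the three
-- searches fails (then A returns False and raises nothing).  Used only to state Pre_/Raises_.
def pvParse? (l : List Char) : Option (List Char) :=
  let n := PySem.Chars.find l "reviewed".toList
  if n < 0 then none else
  let t1 := l.drop (n.toNat + 8)
  let j := PySem.Chars.find t1 ['>']
  if j < 0 then none else
  let t2 := t1.drop (j.toNat + 1)
  let k := PySem.Chars.find t2 ['<']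
  if k < 0 then none else
  some (PySem.Chars.lower (t2.take k.toNat))

-- Pre_ excludes exactly the inputs on which A raises KeyError: a 'reviewed' tag is found
-- but the enclosed value is not 'true'/'false' (case-insensitively).
def Pre_is_reviewed (rdf : String) : Prop :=
  pvParse? rdf.toList = none ∨ pvParse? rdf.toList = some "true".toList ∨
    pvParse? rdf.toList = some "false".toList
instance (rdf : String) : Decidable (Pre_is_reviewed rdf) := by
  unfold Pre_is_reviewed; infer_instance

def pvWitness_is_reviewed : String := "reviewed>True< x"

def Spec_is_reviewed (rdf : String) (out : Bool) : Prop := out = is_reviewed_alt rdf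
instance (rdf : String) (out : Bool) : Decidable (Spec_is_reviewed rdf out) := by
  unfold Spec_is_reviewed; infer_instance

-- ===== CLAIM (what is proved, stated in full; the proofs are below) =====
def Claim_equal_is_reviewed : Prop :=
  ∀ (rdf : String), Dom_is_reviewed rdf → Pre_is_reviewed rdf →
    Spec_is_reviewed rdf (is_reviewed rdf)

-- ===== LEMMAS AND PROOFS =====

theorem findgo_nil (sub : List Char) (k : Nat) :
    PySem.Chars.find.go sub [] k = if sub.isEmpty then (k : Int) else -1 := rfl

theorem findgo_cons (sub : List Char) (c : Char) (t : List Char) (k : Nat) :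
    PySem.Chars.find.go sub (c :: t) k =
      if sub.isPrefixOf (c :: t) then (k : Int) else PySem.Chars.find.go sub t (k + 1) := rfl

-- offset shift of find.go
theorem findgo_shift (sub : List Char) :
    ∀ (l : List Char) (k : Nat), PySem.Chars.find.go sub l k =
      if PySem.Chars.find.go sub l 0 = -1 then -1
      else (k : Int) + PySem.Chars.find.go sub l 0 := by
  intro l
  induction l with
  | nil =>
    intro k; rw [findgo_nil, findgo_nil]
    by_cases h : sub.isEmpty <;> simp [h]
  | cons c t ih =>
    intro k; rw [findgo_cons, findgo_cons]
    by_cases h : sub.isPrefixOf (c :: t)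
    · simp [h]
    · simp only [h, if_false]
      rw [ih (k + 1), ih 1]
      by_cases h2 : PySem.Chars.find.go sub t 0 = -1
      · simp [h2]
      · have hge : -1 ≤ PySem.Chars.find.go sub t 0 := PySem.Chars.neg_one_le_find t sub
        have h1 : (1 : Int) + PySem.Chars.find.go sub t 0 ≠ -1 := by omega
        simp [h2, h1]
        push_cast; ring

-- splitOnMax.go with m = 0 returns immediately
theorem splitgo_m_zero (sep : List Char) (fuel : Nat) (l cur : List Char)
    (acc : List (List Char)) :
    PySem.Chars.splitOnMax.go sep fuel 0 l cur acc = ((cur.reverse ++ l) :: acc).reverse := by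
  cases fuel with
  | zero => rfl
  | succ f => cases l with
    | nil => simp [PySem.Chars.splitOnMax.go]
    | cons c t => simp [PySem.Chars.splitOnMax.go]

-- characterisation of split(sep, 1) by the first occurrence (= find)
theorem splitgo_one (sep : List Char) (hsep : sep ≠ []) :
    ∀ (l : List Char) (fuel : Nat) (cur : List Char) (acc : List (List Char)),
      l.length < fuel →
      PySem.Chars.splitOnMax.go sep fuel 1 l cur acc =
        acc.reverse ++
          (if PySem.Chars.find l sep = -1 then [cur.reverse ++ l]
           else [cur.reverse ++ l.take (PySem.Chars.find l sep).toNat,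
                 l.drop ((PySem.Chars.find l sep).toNat + sep.length)]) := by
  intro l
  induction l with
  | nil =>
    intro fuel cur acc hf
    cases fuel with
    | zero => omega
    | succ f =>
      have hfind : PySem.Chars.find ([] : List Char) sep = -1 := by
        unfold PySem.Chars.find
        rw [findgo_nil]
        simp [List.isEmpty_iff, hsep]
      simp [PySem.Chars.splitOnMax.go, hfind]
  | cons c t ih =>
    intro fuel cur acc hf
    cases fuel with
    | zero => omega
    | succ f =>
      by_cases hp : sep.isPrefixOf (c :: t)
      · have hfind : PySem.Chars.find (c :: t) sep = 0 := by
          unfold PySem.Chars.find; rw [findgo_cons]; simp [hp]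
        simp only [PySem.Chars.splitOnMax.go, hp, if_true]
        rw [splitgo_m_zero]
        simp [hfind]
      · have hfind : PySem.Chars.find (c :: t) sep =
            if PySem.Chars.find t sep = -1 then -1 else 1 + PySem.Chars.find t sep := by
          unfold PySem.Chars.find; rw [findgo_cons]
          simp only [hp]
          exact findgo_shift sep t 1
        have hstep : PySem.Chars.splitOnMax.go sep (f + 1) 1 (c :: t) cur acc =
            PySem.Chars.splitOnMax.go sep f 1 t (c :: cur) acc := by
          simp [PySem.Chars.splitOnMax.go, hp]
        rw [hstep, ih f (c :: cur) acc (by simpa using Nat.lt_of_succ_lt_succ hf)]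
        by_cases h2 : PySem.Chars.find t sep = -1
        · simp [hfind, h2]
        · have hnn : 0 ≤ PySem.Chars.find t sep := by
            have := PySem.Chars.neg_one_le_find t sep; omega
          have htn : (1 + PySem.Chars.find t sep).toNat = (PySem.Chars.find t sep).toNat + 1 := by
            omega
          simp only [hfind, h2, if_false]
          have h1 : (1 : Int) + PySem.Chars.find t sep ≠ -1 := by omega
          have hds : (PySem.Chars.find t sep).toNat + 1 + sep.length =
              ((PySem.Chars.find t sep).toNat + sep.length) + 1 := by omega
          simp only [h1, if_false, htn, hds, List.take_succ_cons, List.drop_succ_cons]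
          simp

-- split(sep, 1) as slices around the first occurrence
theorem splitMax_one_eq (l sep : List Char) (hsep : sep ≠ []) :
    PySem.Chars.splitMax? l sep 1 =
      some (if PySem.Chars.find l sep = -1 then [l]
            else [l.take (PySem.Chars.find l sep).toNat,
                  l.drop ((PySem.Chars.find l sep).toNat + sep.length)]) := by
  unfold PySem.Chars.splitMax? PySem.Chars.splitOnMax
  simp only [List.isEmpty_iff, hsep, if_false]
  rw [if_neg (by omega)]
  simp only [Int.toNat_one]
  rw [splitgo_one sep hsep l (l.length + 1) [] [] (by omega)]
  by_cases h : PySem.Chars.find l sep = -1 <;> simp [h]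

-- find of a single character through a prefix that does not contain it
theorem find_through (c : Char) (r : List Char) :
    ∀ (p : List Char), c ∉ p →
      PySem.Chars.find (p ++ r) [c] =
        if PySem.Chars.find r [c] = -1 then -1
        else (p.length : Int) + PySem.Chars.find r [c] := by
  intro p
  induction p with
  | nil =>
    intro _; simp only [List.nil_append, List.length_nil, Int.ofNat_zero]
    by_cases h : PySem.Chars.find r [c] = -1 <;> simp [h]
  | cons d p ih =>
    intro hc
    simp only [List.mem_cons, not_or] at hc
    have hcd : [c].isPrefixOf (d :: (p ++ r)) = false := by
      simp [List.isPrefixOf, hc.1]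
    have hthis : PySem.Chars.find (d :: (p ++ r)) [c] =
        if PySem.Chars.find (p ++ r) [c] = -1 then -1
        else 1 + PySem.Chars.find (p ++ r) [c] := by
      unfold PySem.Chars.find
      rw [findgo_cons]
      simp only [hcd, Bool.false_eq_true, if_false]
      exact findgo_shift [c] (p ++ r) 1
    simp only [List.cons_append]
    rw [hthis, ih hc.2]
    by_cases h : PySem.Chars.find r [c] = -1
    · simp [h]
    · have hnn : 0 ≤ PySem.Chars.find r [c] := by
        have := PySem.Chars.neg_one_le_find r [c]; omega
      have h1 : (p.length : Int) + PySem.Chars.find r [c] ≠ -1 := by omega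
      simp [h, h1]; push_cast; ring

-- the value-building loop of A is the slice rdf[start:start+k]
theorem value_loop_toList (rdf : String) (a : Nat) :
    ∀ (b : Nat), a + b ≤ rdf.toList.length →
      ((PySem.List.pyRange 0 (b : Int) 1).foldl
        (fun acc i => pvPushGet rdf ((a : Int) + i) acc) "").toList =
        (rdf.toList.drop a).take b := by
  intro b
  induction b with
  | zero => intro _; simp
  | succ n ih =>
    intro hb
    have hcast : ((n : Int) + 1) = ((n + 1 : Nat) : Int) := by push_cast; ring_nf
    have hr : PySem.List.pyRange 0 ((n + 1 : Nat) : Int) 1 =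
        PySem.List.pyRange 0 (n : Int) 1 ++ [(n : Int)] := by
      rw [← hcast, PySem.List.pyRange_one_succ_right (by omega)]
    rw [hr, List.foldl_append]
    have hidx : (a : Int) + (n : Int) = ((a + n : Nat) : Int) := by push_cast; ring
    have hlt : a + n < rdf.toList.length := by omega
    have hget : PySem.Str.pyGet? rdf ((a : Int) + (n : Int)) = some (rdf.toList[a + n]) := by
      rw [hidx, PySem.Str.pyGet?_natCast]
      exact List.getElem?_eq_getElem hlt
    have hstep : ∀ acc, pvPushGet rdf ((a : Int) + (n : Int)) acc = acc.push rdf.toList[a + n] := by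
      intro acc; unfold pvPushGet; rw [hget]
    simp only [List.foldl_cons, List.foldl_nil, hstep]
    rw [String.toList_push, ih (by omega)]
    have hdl : n < (rdf.toList.drop a).length := by rw [List.length_drop]; omega
    rw [List.take_add_one, List.getElem?_eq_getElem hdl]
    simp [List.getElem_drop]

theorem value_loop (rdf : String) (a b : Nat) (h : a + b ≤ rdf.toList.length) :
    (PySem.List.pyRange 0 (b : Int) 1).foldl
        (fun acc i => pvPushGet rdf ((a : Int) + i) acc) "" =
      String.ofList ((rdf.toList.drop a).take b) :=
  String.toList_inj.mp (by rw [value_loop_toList rdf a b h, String.toList_ofList])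

theorem isIn_false_iff_find (sep s : String) :
    PySem.Str.isIn sep s = false ↔ PySem.Chars.find s.toList sep.toList = -1 := by
  rw [PySem.Str.isIn_eq, PySem.Chars.isIn_eq_false_iff, PySem.Chars.find_eq_neg_one_iff]

-- the two list indexings B performs on split(sep, 1), at toList level
theorem split1_tail_toList (s sep : String) (hsep : sep.toList ≠ [])
    (hfind : PySem.Chars.find s.toList sep.toList ≠ -1) :
    (((PySem.Str.splitMax? s sep 1).getD []).getD 1 "").toList =
      s.toList.drop ((PySem.Chars.find s.toList sep.toList).toNat + sep.toList.length) := by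
  have h := PySem.Str.splitMax?_map s sep 1
  rw [splitMax_one_eq _ _ hsep] at h
  cases hsp : PySem.Str.splitMax? s sep 1 with
  | none => rw [hsp] at h; simp [hfind] at h
  | some ps =>
    rw [hsp] at h
    simp only [Option.map_some, Option.some.injEq, hfind, if_false] at h
    cases ps with
    | nil => simp at h
    | cons x t =>
      cases t with
      | nil => simp at h
      | cons y t2 =>
        cases t2 with
        | cons z t3 => simp at h
        | nil =>
          simp only [List.map_cons, List.map_nil, List.cons.injEq, and_true] at h
          simpa using h.2

theorem split1_head_toList (s sep : String) (hsep : sep.toList ≠ [])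
    (hfind : PySem.Chars.find s.toList sep.toList ≠ -1) :
    (((PySem.Str.splitMax? s sep 1).getD []).getD 0 "").toList =
      s.toList.take (PySem.Chars.find s.toList sep.toList).toNat := by
  have h := PySem.Str.splitMax?_map s sep 1
  rw [splitMax_one_eq _ _ hsep] at h
  cases hsp : PySem.Str.splitMax? s sep 1 with
  | none => rw [hsp] at h; simp [hfind] at h
  | some ps =>
    rw [hsp] at h
    simp only [Option.map_some, Option.some.injEq, hfind, if_false] at h
    cases ps with
    | nil => simp at h
    | cons x t =>
      cases t with
      | nil => simp at h
      | cons y t2 =>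
        cases t2 with
        | cons z t3 => simp at h
        | nil =>
          simp only [List.map_cons, List.map_nil, List.cons.injEq, and_true] at h
          simpa using h.1

theorem is_reviewed_agree (rdf : String) (hpre : Pre_is_reviewed rdf) :
    is_reviewed rdf = is_reviewed_alt rdf := by
  unfold is_reviewed is_reviewed_alt
  dsimp only
  set nS := PySem.Str.find rdf "reviewed" with hnS
  have hnC : nS = PySem.Chars.find rdf.toList "reviewed".toList := PySem.Str.find_eq rdf "reviewed"
  clear_value nS
  by_cases h1 : nS = -1
  · -- 'reviewed' not found: both return False
    have hb : PySem.Str.isIn "reviewed" rdf = false := by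
      rw [isIn_false_iff_find, ← hnC]; exact h1
    rw [if_pos h1, if_pos hb]
  · -- 'reviewed' found at nS
    have hn0 : 0 ≤ nS := by
      have := PySem.Chars.neg_one_le_find rdf.toList "reviewed".toList
      rw [hnC]; rw [hnC] at h1; omega
    have hbT : ¬ PySem.Str.isIn "reviewed" rdf = false := by
      rw [isIn_false_iff_find, ← hnC]; exact h1
    rw [if_neg h1, if_neg hbT]
    obtain ⟨tb, htb⟩ := (PySem.Chars.find_spec (by rw [← hnC]; exact hn0)).1
    rw [← hnC] at htb
    have htb8 : rdf.toList.drop (nS.toNat + 8) = tb := by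
      rw [← List.drop_drop, ← htb, show (8 : Nat) = ("reviewed".toList).length from rfl,
        List.drop_left]
    -- B's first peeled tail is tb
    set YS := ((PySem.Str.splitMax? rdf "reviewed" 1).getD []).getD 1 "" with hYS
    clear_value YS
    have hYl : YS.toList = tb := by
      rw [hYS, split1_tail_toList rdf "reviewed" (by decide) (by rw [← hnC]; exact h1)]
      rw [← hnC]; exact htb8
    -- A's second search, through the 'reviewed' it found
    set jS := PySem.Str.find (PySem.Str.slice rdf (some nS) none) ">" with hjS
    have hjC : jS = if PySem.Chars.find tb ['>'] = -1 then -1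
        else 8 + PySem.Chars.find tb ['>'] := by
      rw [hjS, PySem.Str.find_eq, PySem.Str.toList_slice, PySem.Chars.slice_eq_listSlice,
        PySem.List.slice_from rdf.toList hn0, ← htb]
      exact find_through '>' tb "reviewed".toList (by decide)
    clear_value jS
    by_cases h2 : PySem.Chars.find tb ['>'] = -1
    · -- no '>' after the tag: both return False
      have hbY : PySem.Str.isIn ">" YS = false := by
        rw [isIn_false_iff_find, hYl]; exact h2
      rw [if_pos (by rw [hjC, if_pos h2]), if_pos hbY]
    · have hj0 : 0 ≤ PySem.Chars.find tb ['>'] := by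
        have := PySem.Chars.neg_one_le_find tb ['>']; omega
      have hjv : jS = 8 + PySem.Chars.find tb ['>'] := by rw [hjC, if_neg h2]
      have hbY : ¬ PySem.Str.isIn ">" YS = false := by
        rw [isIn_false_iff_find, hYl]; exact h2
      rw [if_neg (by rw [hjv]; omega), if_neg hbY]
      -- the region after the '>'
      have hdrop2 : rdf.toList.drop ((nS + jS + 1).toNat) =
          tb.drop ((PySem.Chars.find tb ['>']).toNat + 1) := by
        have : (nS + jS + 1).toNat = (nS.toNat + 8) + ((PySem.Chars.find tb ['>']).toNat + 1) := by
          rw [hjv]; omega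
        rw [this, ← List.drop_drop, htb8]
      set t2 := tb.drop ((PySem.Chars.find tb ['>']).toNat + 1) with ht2
      clear_value t2
      -- B's second peeled tail is t2
      set Y2S := ((PySem.Str.splitMax? YS ">" 1).getD []).getD 1 "" with hY2S
      clear_value Y2S
      have hY2l : Y2S.toList = t2 := by
        rw [hY2S, split1_tail_toList YS ">" (by decide) (by rw [hYl]; exact h2), hYl, ht2]
        rfl
      -- A's third search
      set kS := PySem.Str.find (PySem.Str.slice rdf (some (nS + jS + 1)) none) "<" with hkS
      have hkC : kS = PySem.Chars.find t2 ['<'] := by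
        rw [hkS, PySem.Str.find_eq, PySem.Str.toList_slice, PySem.Chars.slice_eq_listSlice,
          PySem.List.slice_from rdf.toList (by omega), hdrop2]
        rfl
      clear_value kS
      by_cases h3 : PySem.Chars.find t2 ['<'] = -1
      · have hbY2 : PySem.Str.isIn "<" Y2S = false := by
          rw [isIn_false_iff_find, hY2l]; exact h3
        rw [if_pos (by rw [hkC]; exact h3), if_pos hbY2]
      · have hk0 : 0 ≤ kS := by
          have := PySem.Chars.neg_one_le_find t2 ['<']; rw [hkC]; omega
        have hbY2 : ¬ PySem.Str.isIn "<" Y2S = false := by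
          rw [isIn_false_iff_find, hY2l]; exact h3
        rw [if_neg (by rw [hkC]; exact h3), if_neg hbY2]
        -- A's value loop builds the slice between '>' and '<'
        have hlent2 : t2.length = rdf.toList.length - (nS + jS + 1).toNat := by
          rw [← hdrop2, List.length_drop]
        have hklen : kS ≤ (t2.length : Int) := by
          rw [hkC]; exact PySem.Chars.find_le_length t2 ['<']
        have ht2pos : 0 < t2.length := by
          cases ht2e : t2 with
          | nil => rw [ht2e] at hkC; rw [show PySem.Chars.find ([] : List Char) ['<'] = -1
              from by decide] at hkC; omega
          | cons c cs => simp
        have hblen : (nS + jS + 1).toNat + kS.toNat ≤ rdf.toList.length := by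
          have h1' := hklen
          have h2' := hlent2
          omega
        rw [show nS + jS + 1 + kS - (nS + jS + 1) = ((kS.toNat : Nat) : Int) by omega,
          show nS + jS + 1 = (((nS + jS + 1).toNat : Nat) : Int) from
            (Int.toNat_of_nonneg (by omega)).symm,
          value_loop rdf ((nS + jS + 1).toNat) kS.toNat hblen, hdrop2]
        -- B's extracted value
        have hXE : ((PySem.Str.splitMax? Y2S "<" 1).getD []).getD 0 "" =
            String.ofList (t2.take kS.toNat) := by
          apply String.toList_inj.mp
          rw [String.toList_ofList,
            split1_head_toList Y2S "<" (by decide) (by rw [hY2l]; exact h3), hY2l, hkC]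
          rfl
        rw [hXE]
        have hlow : PySem.Str.lower (String.ofList (t2.take kS.toNat)) =
            String.ofList (PySem.Chars.lower (t2.take kS.toNat)) := by
          apply String.toList_inj.mp
          rw [PySem.Str.toList_lower, String.toList_ofList, String.toList_ofList]
        rw [hlow]
        -- the precondition pins the value to 'true'/'false'
        have hparse : pvParse? rdf.toList = some (PySem.Chars.lower (t2.take kS.toNat)) := by
          unfold pvParse?
          dsimp only
          rw [← hnC, if_neg (show ¬ nS < 0 by omega), htb8,
            if_neg (show ¬ PySem.Chars.find tb ['>'] < 0 by omega), ← ht2,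
            if_neg (show ¬ PySem.Chars.find t2 ['<'] < 0 by
              have := PySem.Chars.neg_one_le_find t2 ['<']; omega),
            hkC]
        unfold Pre_is_reviewed at hpre
        rw [hparse] at hpre
        rcases hpre with h | h | h
        · exact absurd h (by simp)
        · rw [show String.ofList (PySem.Chars.lower (t2.take kS.toNat)) = "true" from
            String.toList_inj.mp (by rw [String.toList_ofList]; exact Option.some_inj.mp h)]
          rfl
        · rw [show String.ofList (PySem.Chars.lower (t2.take kS.toNat)) = "false" from
            String.toList_inj.mp (by rw [String.toList_ofList]; exact Option.some_inj.mp h)]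
          rfl

-- ===== VERDICT (by name: the statement is the Claim_ definition above) =====
theorem is_reviewed_spec : Claim_equal_is_reviewed := by
  intro rdf _ hpre
  unfold Spec_is_reviewed
  exact is_reviewed_agree rdf hpre
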